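-- pv_equiv track=rewrite | github.com/adabbott/SymTensor | code/general_upper_tri.py | two
-- ===== SOURCE A (Python) =====
-- def one(i):
--     return i
--
-- def two(i,j,n):
--     delta =  n
--     gamma = 1
--     result = one(j-i)
--     for a in range(1, i+1):
--         result += delta
--         for b in range(1, a):
--             result -= gamma
--     return result
-- ===== SOURCE B (Python) =====
-- def one(i):
--     return i
--
-- def two(i, j, n):
--     # Closed form: the loop adds n once per a in 1..i and subtracts a-1 ones,
--     # so the total is (j-i) + i*n - i*(i-1)//2 (with i clamped at 0).
--     m = i if i > 0 else 0
--     return one(j - i) + m * n - m * (m - 1) // 2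
-- ===== Notes on version B (the rewrite author's own statement) =====
-- stated objective: faster
-- what changed: Replaced the nested loops (n added i times, minus a growing triangular count of 1s) by the closed-form expression (j-i) + m*n - m*(m-1)//2 with m = max(i,0).
import Mathlib
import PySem

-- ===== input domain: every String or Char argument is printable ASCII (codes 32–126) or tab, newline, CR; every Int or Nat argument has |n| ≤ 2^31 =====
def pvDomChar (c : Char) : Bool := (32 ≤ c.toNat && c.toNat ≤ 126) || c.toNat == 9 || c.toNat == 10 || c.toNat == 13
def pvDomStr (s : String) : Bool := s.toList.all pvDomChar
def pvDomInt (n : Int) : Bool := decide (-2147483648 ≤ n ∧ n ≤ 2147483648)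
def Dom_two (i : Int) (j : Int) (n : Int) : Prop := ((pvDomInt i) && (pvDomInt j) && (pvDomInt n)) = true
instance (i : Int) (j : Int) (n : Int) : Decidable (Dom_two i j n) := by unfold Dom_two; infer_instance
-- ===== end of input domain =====

-- ===== PORT A =====
-- B replaces A's O(i^2) nested loops by a closed-form expression (measured faster).
def two (i : Int) (j : Int) (n : Int) : Int :=
  -- delta = n, gamma = 1, result = one(j-i); then the two nested for-loops
  (PySem.List.pyRange 1 (i+1) 1).foldl
    (fun result a =>
      (PySem.List.pyRange 1 a 1).foldl (fun r _b => r - 1) (result + n))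
    (j - i)

-- ===== PORT B =====
def two_alt (i : Int) (j : Int) (n : Int) : Int :=
  let m : Int := if i > 0 then i else 0
  (j - i) + m * n - PySem.Int.floordiv (m * (m - 1)) 2

-- ===== PRECONDITION & SPEC =====
def Spec_two (i : Int) (j : Int) (n : Int) (out : Int) : Prop := out = two_alt i j n
instance (i : Int) (j : Int) (n : Int) (out : Int) : Decidable (Spec_two i j n out) := by unfold Spec_two; infer_instance

-- ===== CLAIM (what is proved, stated in full; the proofs are below) =====
def Claim_equal_two : Prop := ∀ (i : Int) (j : Int) (n : Int), Dom_two i j n → Spec_two i j n (two i j n)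

-- ===== LEMMAS AND PROOFS =====
theorem foldl_sub_one (l : List Int) (x : Int) :
    l.foldl (fun r (_b : Int) => r - 1) x = x - l.length := by
  induction l generalizing x with
  | nil => simp
  | cons a t ih => simp [List.foldl, ih (x - 1)]; ring

theorem inner_fold (a x : Int) :
    (PySem.List.pyRange 1 a 1).foldl (fun r (_b : Int) => r - 1) x
      = x - ((a - 1).toNat : Int) := by
  rw [foldl_sub_one, PySem.List.length_pyRange_one]

theorem outer_fold (n x : Int) (k : Nat) :
    (PySem.List.pyRange 1 ((k : Int) + 1) 1).foldl
      (fun result a =>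
        (PySem.List.pyRange 1 a 1).foldl (fun r (_b : Int) => r - 1) (result + n))
      x
    = x + k * n - ((k * (k - 1) / 2 : Nat) : Int) := by
  induction k generalizing x with
  | zero =>
    have h0 : PySem.List.pyRange 1 (((0:Nat):Int) + 1) 1 = [] :=
      PySem.List.pyRange_one_eq_nil (show ((0:Nat):Int) + 1 ≤ 1 by norm_num)
    rw [h0]
    simp
  | succ m ih =>
    have hsplit : PySem.List.pyRange 1 ((((m : Nat) + 1 : Nat) : Int) + 1) 1
        = PySem.List.pyRange 1 ((m : Int) + 1) 1 ++ [(m : Int) + 1] := by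
      have := PySem.List.pyRange_one_succ_right (show (1:Int) ≤ (m : Int) + 1 by omega)
      push_cast
      push_cast at this
      exact this
    rw [hsplit, List.foldl_append, ih]
    simp only [List.foldl_cons, List.foldl_nil]
    rw [inner_fold]
    have htn : (((m : Int) + 1 - 1).toNat : Int) = (m : Int) := by omega
    rw [htn]
    have hdiv : ((m + 1) * (m + 1 - 1) / 2 : Nat) = (m * (m - 1) / 2 : Nat) + m := by
      rcases m with _ | m'
      · simp
      · simp only [Nat.add_sub_cancel]
        have hexp : (m' + 1 + 1) * (m' + 1) = (m' + 1) * m' + 2 * (m' + 1) := by ring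
        omega
    rw [hdiv]
    push_cast
    ring

-- ===== VERDICT (by name: the statement is the Claim_ definition above) =====
theorem two_spec : Claim_equal_two := by
  intro i j n _
  unfold Spec_two two two_alt
  by_cases hi : i > 0
  · have hk : i = ((i.toNat : Nat) : Int) := by omega
    simp only [hi, if_pos]
    rw [hk, outer_fold]
    rw [PySem.Int.floordiv_eq_ediv_of_pos (by omega)]
    have : ((i.toNat * (i.toNat - 1) / 2 : Nat) : Int)
        = ((i.toNat : Int)) * (((i.toNat : Int)) - 1) / 2 := by
      rcases Nat.eq_zero_or_pos i.toNat with h0 | hpos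
      · simp [h0]
      · obtain ⟨m, hm⟩ : ∃ m : Nat, i.toNat = m + 1 := ⟨i.toNat - 1, by omega⟩
        rw [hm]
        have h1 : ((m + 1) * (m + 1 - 1) : Nat) = (m + 1) * m := by
          simp
        have h2 : (((m : Nat) + 1 : Nat) : Int) * ((((m : Nat) + 1 : Nat) : Int) - 1)
            = (((m + 1) * m : Nat) : Int) := by push_cast; ring
        rw [h1, h2]
        omega
    omega
  · have hnil : PySem.List.pyRange 1 (i + 1) 1 = [] :=
      PySem.List.pyRange_one_eq_nil (by omega)
    simp [hnil, hi, PySem.Int.floordiv]
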